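-- pv_equiv track=rewrite | github.com/ONS-OpenData/cmd-databaker-utils | databakerUtils/sparsityFunctions.py | SplittingMissingCombinations
-- ===== SOURCE A (Python) =====
-- def SplittingMissingCombinations(missingCombos, columnCodeList):
--     '''splits the missing combinations into separate lists for each dimension'''
--     if len(columnCodeList) == 3:
--         firstCombo, secondCombo, thirdCombo = [], [], []
--         for code in missingCombos:
--             newValue = code.split('^')
--             firstCombo.append(newValue[0])
--             secondCombo.append(newValue[1])
--             thirdCombo.append(newValue[2])
--         return [firstCombo, secondCombo, thirdCombo]
--
--     elif len(columnCodeList) == 4: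
--         firstCombo, secondCombo, thirdCombo, forthCombo = [], [], [], []
--         for code in missingCombos:
--             newValue = code.split('^')
--             firstCombo.append(newValue[0])
--             secondCombo.append(newValue[1])
--             thirdCombo.append(newValue[2])
--             forthCombo.append(newValue[3])
--         return [firstCombo, secondCombo, thirdCombo, forthCombo]
--
--     elif len(columnCodeList) == 5:
--         firstCombo, secondCombo, thirdCombo, forthCombo, fithCombo = [], [], [], [], []
--         for code in missingCombos:
--             newValue = code.split('^')
--             firstCombo.append(newValue[0])
--             secondCombo.append(newValue[1])
--             thirdCombo.append(newValue[2])
--             forthCombo.append(newValue[3])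
--             fithCombo.append(newValue[4])
--         return [firstCombo, secondCombo, thirdCombo, forthCombo, fithCombo]
--
--     elif len(columnCodeList) == 6:
--         firstCombo, secondCombo, thirdCombo, forthCombo, fithCombo, sixthCombo = [], [], [], [], [], []
--         for code in missingCombos:
--             newValue = code.split('^')
--             firstCombo.append(newValue[0])
--             secondCombo.append(newValue[1])
--             thirdCombo.append(newValue[2])
--             forthCombo.append(newValue[3])
--             fithCombo.append(newValue[4])
--             sixthCombo.append(newValue[5])
--         return [firstCombo, secondCombo, thirdCombo, forthCombo, fithCombo, sixthCombo]
-- ===== SOURCE B (Python) =====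
-- def SplittingMissingCombinations(missingCombos, columnCodeList):
--     '''splits the missing combinations into separate lists for each dimension'''
--     if len(columnCodeList) not in (3, 4, 5, 6):
--         return None
--     rows = [code.split('^') for code in missingCombos]
--     return [[row[i] for row in rows] for i in range(len(columnCodeList))]
-- ===== Notes on version B (the rewrite author's own statement) =====
-- stated objective: simpler
-- what changed: Replaces A's four copy-pasted branches with per-arity named accumulator lists by one guard plus a split-once table and a column-major transpose comprehension.
import Mathlib
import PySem

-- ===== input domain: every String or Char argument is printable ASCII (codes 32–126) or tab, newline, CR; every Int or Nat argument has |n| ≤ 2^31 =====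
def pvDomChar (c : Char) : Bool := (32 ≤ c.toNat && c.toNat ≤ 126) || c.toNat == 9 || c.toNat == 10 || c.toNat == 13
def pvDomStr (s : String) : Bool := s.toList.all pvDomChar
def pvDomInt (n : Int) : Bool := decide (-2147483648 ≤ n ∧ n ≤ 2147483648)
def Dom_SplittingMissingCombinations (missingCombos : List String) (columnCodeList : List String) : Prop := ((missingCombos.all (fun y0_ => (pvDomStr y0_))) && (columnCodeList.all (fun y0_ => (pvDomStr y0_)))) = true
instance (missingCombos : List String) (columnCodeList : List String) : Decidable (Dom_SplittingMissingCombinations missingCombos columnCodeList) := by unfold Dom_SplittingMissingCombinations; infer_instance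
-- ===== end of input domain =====

-- B replaces A's four copy-pasted per-arity branches (row-by-row distribution into
-- named accumulators) by one guard, a split-once table and a column-major transpose pass.

-- ===== PORT A =====
-- s.split('^') for the non-empty literal separator '^' (never raises): exact via PySem.Chars.splitOn
def pySplitCaret (s : String) : List String := (PySem.Chars.splitOn s.toList ['^']).map String.mk

-- A's per-arity loops: each walks missingCombos once, splitting each code on '^' and
-- appending fields 0..n-1 to n accumulator lists; an out-of-range field (Python
-- IndexError) makes the whole result none.
def loopA3 : List String → List String × List String × List String →
    Option (List String × List String × List String)
  | [], acc => some acc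
  | code :: rest, (l1, l2, l3) =>
    let nv := pySplitCaret code
    match PySem.List.pyGet? nv 0, PySem.List.pyGet? nv 1, PySem.List.pyGet? nv 2 with
    | some a, some b, some c => loopA3 rest (l1 ++ [a], l2 ++ [b], l3 ++ [c])
    | _, _, _ => none

def loopA4 : List String → List String × List String × List String × List String →
    Option (List String × List String × List String × List String)
  | [], acc => some acc
  | code :: rest, (l1, l2, l3, l4) =>
    let nv := pySplitCaret code
    match PySem.List.pyGet? nv 0, PySem.List.pyGet? nv 1, PySem.List.pyGet? nv 2,
          PySem.List.pyGet? nv 3 with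
    | some a, some b, some c, some d => loopA4 rest (l1 ++ [a], l2 ++ [b], l3 ++ [c], l4 ++ [d])
    | _, _, _, _ => none

def loopA5 : List String → List String × List String × List String × List String × List String →
    Option (List String × List String × List String × List String × List String)
  | [], acc => some acc
  | code :: rest, (l1, l2, l3, l4, l5) =>
    let nv := pySplitCaret code
    match PySem.List.pyGet? nv 0, PySem.List.pyGet? nv 1, PySem.List.pyGet? nv 2,
          PySem.List.pyGet? nv 3, PySem.List.pyGet? nv 4 with
    | some a, some b, some c, some d, some e =>
        loopA5 rest (l1 ++ [a], l2 ++ [b], l3 ++ [c], l4 ++ [d], l5 ++ [e])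
    | _, _, _, _, _ => none

def loopA6 : List String →
    List String × List String × List String × List String × List String × List String →
    Option (List String × List String × List String × List String × List String × List String)
  | [], acc => some acc
  | code :: rest, (l1, l2, l3, l4, l5, l6) =>
    let nv := pySplitCaret code
    match PySem.List.pyGet? nv 0, PySem.List.pyGet? nv 1, PySem.List.pyGet? nv 2,
          PySem.List.pyGet? nv 3, PySem.List.pyGet? nv 4, PySem.List.pyGet? nv 5 with
    | some a, some b, some c, some d, some e, some f =>
        loopA6 rest (l1 ++ [a], l2 ++ [b], l3 ++ [c], l4 ++ [d], l5 ++ [e], l6 ++ [f])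
    | _, _, _, _, _, _ => none

def SplittingMissingCombinations (missingCombos : List String) (columnCodeList : List String) :
    Option (List (List String)) :=
  if columnCodeList.length = 3 then
    match loopA3 missingCombos ([], [], []) with
    | some (l1, l2, l3) => some [l1, l2, l3]
    | none => none
  else if columnCodeList.length = 4 then
    match loopA4 missingCombos ([], [], [], []) with
    | some (l1, l2, l3, l4) => some [l1, l2, l3, l4]
    | none => none
  else if columnCodeList.length = 5 then
    match loopA5 missingCombos ([], [], [], [], []) with
    | some (l1, l2, l3, l4, l5) => some [l1, l2, l3, l4, l5]
    | none => none
  else if columnCodeList.length = 6 then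
    match loopA6 missingCombos ([], [], [], [], [], []) with
    | some (l1, l2, l3, l4, l5, l6) => some [l1, l2, l3, l4, l5, l6]
    | none => none
  else none  -- Python falls off the function: returns None

-- ===== PORT B =====
-- [row[i] for row in rows]: one column of the table; none = IndexError.
def colB (rows : List (List String)) (i : Int) : Option (List String) :=
  match rows with
  | [] => some []
  | r :: rest =>
    match PySem.List.pyGet? r i with
    | none => none
    | some v => (colB rest i).map (v :: ·)

-- [[row[i] for row in rows] for i in idxs]
def colsB (rows : List (List String)) : List Int → Option (List (List String))
  | [] => some []
  | i :: is =>
    match colB rows i with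
    | none => none
    | some c => (colsB rows is).map (c :: ·)

def SplittingMissingCombinations_alt (missingCombos : List String) (columnCodeList : List String) :
    Option (List (List String)) :=
  let n := columnCodeList.length
  if n = 3 ∨ n = 4 ∨ n = 5 ∨ n = 6 then
    let rows := missingCombos.map (fun code => pySplitCaret code)
    colsB rows ((List.range n).map (Int.ofNat ·))
  else none

-- ===== PRECONDITION & SPEC =====
-- Pre_ excludes exactly the inputs where the Python A raises IndexError: an arity in
-- {3,4,5,6} with some combo string whose '^'-split has fewer fields than the arity.
def Pre_SplittingMissingCombinations (missingCombos : List String) (columnCodeList : List String) : Prop :=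
  columnCodeList.length ∈ ([3, 4, 5, 6] : List Nat) →
    ∀ code ∈ missingCombos, columnCodeList.length ≤ (pySplitCaret code).length
instance (missingCombos : List String) (columnCodeList : List String) : Decidable (Pre_SplittingMissingCombinations missingCombos columnCodeList) := by unfold Pre_SplittingMissingCombinations; infer_instance

def pvWitness_SplittingMissingCombinations : List String × List String :=
  (["a^b^c", "d^e^f"], ["x", "y", "z"])

def Spec_SplittingMissingCombinations (missingCombos : List String) (columnCodeList : List String) (out : Option (List (List String))) : Prop := out = SplittingMissingCombinations_alt missingCombos columnCodeList
instance (missingCombos : List String) (columnCodeList : List String) (out : Option (List (List String))) : Decidable (Spec_SplittingMissingCombinations missingCombos columnCodeList out) := by unfold Spec_SplittingMissingCombinations; infer_instance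

-- ===== CLAIM (what is proved, stated in full; the proofs are below) =====
def Claim_equal_SplittingMissingCombinations : Prop := ∀ (missingCombos : List String) (columnCodeList : List String), Dom_SplittingMissingCombinations missingCombos columnCodeList → Pre_SplittingMissingCombinations missingCombos columnCodeList → Spec_SplittingMissingCombinations missingCombos columnCodeList (SplittingMissingCombinations missingCombos columnCodeList)

-- ===== LEMMAS AND PROOFS =====

theorem loopA3_eq (l : List String) (l1 l2 l3 : List String) :
    loopA3 l (l1, l2, l3) =
      (colB (l.map (fun code => pySplitCaret code)) 0).bind fun a =>
      (colB (l.map (fun code => pySplitCaret code)) 1).bind fun b =>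
      (colB (l.map (fun code => pySplitCaret code)) 2).map fun c =>
        (l1 ++ a, l2 ++ b, l3 ++ c) := by
  induction l generalizing l1 l2 l3 with
  | nil => simp [loopA3, colB]
  | cons code rest ih =>
    simp only [loopA3, colB, List.map_cons]
    rcases h0 : PySem.List.pyGet? (pySplitCaret code) 0 with _ | a <;>
    rcases h1 : PySem.List.pyGet? (pySplitCaret code) 1 with _ | b <;>
    rcases h2 : PySem.List.pyGet? (pySplitCaret code) 2 with _ | c <;>
      simp [ih] <;>
      (rcases colB (rest.map (fun code => pySplitCaret code)) 0 with _ | x0 <;>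
       rcases colB (rest.map (fun code => pySplitCaret code)) 1 with _ | x1 <;>
       rcases colB (rest.map (fun code => pySplitCaret code)) 2 with _ | x2 <;>
       simp)

theorem loopA4_eq (l : List String) (l1 l2 l3 l4 : List String) :
    loopA4 l (l1, l2, l3, l4) =
      (colB (l.map (fun code => pySplitCaret code)) 0).bind fun a =>
      (colB (l.map (fun code => pySplitCaret code)) 1).bind fun b =>
      (colB (l.map (fun code => pySplitCaret code)) 2).bind fun c =>
      (colB (l.map (fun code => pySplitCaret code)) 3).map fun d =>
        (l1 ++ a, l2 ++ b, l3 ++ c, l4 ++ d) := by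
  induction l generalizing l1 l2 l3 l4 with
  | nil => simp [loopA4, colB]
  | cons code rest ih =>
    simp only [loopA4, colB, List.map_cons]
    rcases h0 : PySem.List.pyGet? (pySplitCaret code) 0 with _ | a <;>
    rcases h1 : PySem.List.pyGet? (pySplitCaret code) 1 with _ | b <;>
    rcases h2 : PySem.List.pyGet? (pySplitCaret code) 2 with _ | c <;>
    rcases h3 : PySem.List.pyGet? (pySplitCaret code) 3 with _ | d <;>
      simp [ih] <;>
      (rcases colB (rest.map (fun code => pySplitCaret code)) 0 with _ | x0 <;>
       rcases colB (rest.map (fun code => pySplitCaret code)) 1 with _ | x1 <;>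
       rcases colB (rest.map (fun code => pySplitCaret code)) 2 with _ | x2 <;>
       rcases colB (rest.map (fun code => pySplitCaret code)) 3 with _ | x3 <;>
       simp)

theorem loopA5_eq (l : List String) (l1 l2 l3 l4 l5 : List String) :
    loopA5 l (l1, l2, l3, l4, l5) =
      (colB (l.map (fun code => pySplitCaret code)) 0).bind fun a =>
      (colB (l.map (fun code => pySplitCaret code)) 1).bind fun b =>
      (colB (l.map (fun code => pySplitCaret code)) 2).bind fun c =>
      (colB (l.map (fun code => pySplitCaret code)) 3).bind fun d =>
      (colB (l.map (fun code => pySplitCaret code)) 4).map fun e =>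
        (l1 ++ a, l2 ++ b, l3 ++ c, l4 ++ d, l5 ++ e) := by
  induction l generalizing l1 l2 l3 l4 l5 with
  | nil => simp [loopA5, colB]
  | cons code rest ih =>
    simp only [loopA5, colB, List.map_cons]
    rcases h0 : PySem.List.pyGet? (pySplitCaret code) 0 with _ | a <;>
    rcases h1 : PySem.List.pyGet? (pySplitCaret code) 1 with _ | b <;>
    rcases h2 : PySem.List.pyGet? (pySplitCaret code) 2 with _ | c <;>
    rcases h3 : PySem.List.pyGet? (pySplitCaret code) 3 with _ | d <;>
    rcases h4 : PySem.List.pyGet? (pySplitCaret code) 4 with _ | e <;>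
      simp [ih] <;>
      (rcases colB (rest.map (fun code => pySplitCaret code)) 0 with _ | x0 <;>
       rcases colB (rest.map (fun code => pySplitCaret code)) 1 with _ | x1 <;>
       rcases colB (rest.map (fun code => pySplitCaret code)) 2 with _ | x2 <;>
       rcases colB (rest.map (fun code => pySplitCaret code)) 3 with _ | x3 <;>
       rcases colB (rest.map (fun code => pySplitCaret code)) 4 with _ | x4 <;>
       simp)

theorem loopA6_eq (l : List String) (l1 l2 l3 l4 l5 l6 : List String) :
    loopA6 l (l1, l2, l3, l4, l5, l6) =
      (colB (l.map (fun code => pySplitCaret code)) 0).bind fun a =>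
      (colB (l.map (fun code => pySplitCaret code)) 1).bind fun b =>
      (colB (l.map (fun code => pySplitCaret code)) 2).bind fun c =>
      (colB (l.map (fun code => pySplitCaret code)) 3).bind fun d =>
      (colB (l.map (fun code => pySplitCaret code)) 4).bind fun e =>
      (colB (l.map (fun code => pySplitCaret code)) 5).map fun f =>
        (l1 ++ a, l2 ++ b, l3 ++ c, l4 ++ d, l5 ++ e, l6 ++ f) := by
  induction l generalizing l1 l2 l3 l4 l5 l6 with
  | nil => simp [loopA6, colB]
  | cons code rest ih =>
    simp only [loopA6, colB, List.map_cons]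
    rcases h0 : PySem.List.pyGet? (pySplitCaret code) 0 with _ | a <;>
    rcases h1 : PySem.List.pyGet? (pySplitCaret code) 1 with _ | b <;>
    rcases h2 : PySem.List.pyGet? (pySplitCaret code) 2 with _ | c <;>
    rcases h3 : PySem.List.pyGet? (pySplitCaret code) 3 with _ | d <;>
    rcases h4 : PySem.List.pyGet? (pySplitCaret code) 4 with _ | e <;>
    rcases h5 : PySem.List.pyGet? (pySplitCaret code) 5 with _ | f <;>
      simp [ih] <;>
      (rcases colB (rest.map (fun code => pySplitCaret code)) 0 with _ | x0 <;>
       rcases colB (rest.map (fun code => pySplitCaret code)) 1 with _ | x1 <;>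
       rcases colB (rest.map (fun code => pySplitCaret code)) 2 with _ | x2 <;>
       rcases colB (rest.map (fun code => pySplitCaret code)) 3 with _ | x3 <;>
       rcases colB (rest.map (fun code => pySplitCaret code)) 4 with _ | x4 <;>
       rcases colB (rest.map (fun code => pySplitCaret code)) 5 with _ | x5 <;>
       simp)

-- ===== VERDICT (by name: the statement is the Claim_ definition above) =====
theorem SplittingMissingCombinations_spec : Claim_equal_SplittingMissingCombinations := by
  intro mc ccl _hDom _hPre
  unfold Spec_SplittingMissingCombinations SplittingMissingCombinations SplittingMissingCombinations_alt
  set rows := mc.map (fun code => pySplitCaret code) with hrows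
  by_cases h3 : ccl.length = 3
  · simp only [h3, if_pos rfl, if_pos (by omega : (3:Nat) = 3 ∨ 3 = 4 ∨ 3 = 5 ∨ 3 = 6)]
    rw [loopA3_eq]
    simp only [show (List.range 3).map (Int.ofNat ·) = [0, 1, 2] from rfl, colsB, ← hrows]
    rcases colB rows 0 with _ | a <;> rcases colB rows 1 with _ | b <;>
      rcases colB rows 2 with _ | c <;> simp
  · by_cases h4 : ccl.length = 4
    · simp only [h3, h4, if_neg (by omega), if_pos rfl,
        if_pos (by omega : (4:Nat) = 3 ∨ 4 = 4 ∨ 4 = 5 ∨ 4 = 6)]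
      rw [loopA4_eq]
      simp only [show (List.range 4).map (Int.ofNat ·) = [0, 1, 2, 3] from rfl, colsB, ← hrows]
      rcases colB rows 0 with _ | a <;> rcases colB rows 1 with _ | b <;>
        rcases colB rows 2 with _ | c <;> rcases colB rows 3 with _ | d <;> simp
    · by_cases h5 : ccl.length = 5
      · simp only [h3, h4, h5, if_neg (by omega), if_pos rfl,
          if_pos (by omega : (5:Nat) = 3 ∨ 5 = 4 ∨ 5 = 5 ∨ 5 = 6)]
        rw [loopA5_eq]
        simp only [show (List.range 5).map (Int.ofNat ·) = [0, 1, 2, 3, 4] from rfl, colsB, ← hrows]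
        rcases colB rows 0 with _ | a <;> rcases colB rows 1 with _ | b <;>
          rcases colB rows 2 with _ | c <;> rcases colB rows 3 with _ | d <;>
          rcases colB rows 4 with _ | e <;> simp
      · by_cases h6 : ccl.length = 6
        · simp only [h3, h4, h5, h6, if_neg (by omega), if_pos rfl,
            if_pos (by omega : (6:Nat) = 3 ∨ 6 = 4 ∨ 6 = 5 ∨ 6 = 6)]
          rw [loopA6_eq]
          simp only [show (List.range 6).map (Int.ofNat ·) = [0, 1, 2, 3, 4, 5] from rfl, colsB,
            ← hrows]
          rcases colB rows 0 with _ | a <;> rcases colB rows 1 with _ | b <;>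
            rcases colB rows 2 with _ | c <;> rcases colB rows 3 with _ | d <;>
            rcases colB rows 4 with _ | e <;> rcases colB rows 5 with _ | f <;> simp
        · simp [h3, h4, h5, h6]
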